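-- pv_equiv track=rewrite | github.com/bloominstituteoftechnology/Computer-Architecture | ls8/cpu.py | bitwise_opp
-- ===== SOURCE A (Python) =====
-- def bitwise_opp(value, maskFirst=True, mask=None, maskType=1,  bitShiftVal=None, bitShiftDir="r", useNot=False):
--     """
--     Value starts with holding the opcode and then will at the end hold the value asked for.
--     This function can be used to get the values or info from
--     a byte. A mask can be passed in, the the mask parameter and the type of mask
--     in the maskType.  The mask type can be 1 for ANDING, 2 for ORing and 3 for XORing.
--     After the mask has been applied, a bitwise shift can then also be applied which is
--     applied after the mask.  The value of this is then returned.
--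
--     If only a bitwise shift is wanted then can put maskFirst as False and don't pass a mask,
--     and put in a bitshift value. Default is to shift to the right
--
--     Before returning will check to see if the useNot is True.  If it is then will use this and then return the value
--     """
--
--     working = True
--     firstDone = False
--
--     while working:
--
--         if maskFirst or firstDone:
--             if mask != None:
--
--                 # applying the mask
--                 # XOR --- to toggle the bits on or off
--                 if maskType == 3:
--                     value = value ^ mask
--                 # ORing  -- to set some of the values to 1 or to
--                 # make sure some of the bits are turned on.
--                 elif maskType == 2:
--                     value = value | mask
--                 # ANDing  -- to extract some of the bits out of the
--                 # byte
--                 elif maskType == 1: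
--                     value = value & mask
--                 else:
--                     raise Exception("Wrong value for mask type used")
--             if firstDone == False:
--                 # saying that the first is done
--                 firstDone = True
--             else:
--                 if useNot:
--                     return ~(value)
--
--                 return value
--
--         # now doing the bitwise operation
--         if not maskFirst or firstDone:
--             if bitShiftVal != None:
--                 if bitShiftDir == "r":
--                     value = value >>  bitShiftVal
--                 else:
--                     value = value << bitShiftVal
--             if not firstDone:
--                 firstDone = True
--             else:
--                 if useNot:
--                     return ~(value)
--
--                 return value
-- ===== SOURCE B (Python) =====
-- def bitwise_opp(value, maskFirst=True, mask=None, maskType=1, bitShiftVal=None, bitShiftDir="r", useNot=False):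
--     # Pipeline-as-data: build the list of pending operations as closures,
--     # reverse it when the mask is not to be applied first, then fold it over value.
--     pipeline = []
--     if mask is not None:
--         dispatch = {
--             3: (lambda v: v ^ mask),
--             2: (lambda v: v | mask),
--             1: (lambda v: v & mask),
--         }
--         if maskType not in dispatch:
--             raise Exception("Wrong value for mask type used")
--         pipeline.append(dispatch[maskType])
--     if bitShiftVal is not None:
--         pipeline.append(lambda v: v >> bitShiftVal if bitShiftDir == "r" else v << bitShiftVal)
--     if not maskFirst:
--         pipeline.reverse()
--     for op in pipeline:
--         value = op(value)
--     return ~value if useNot else value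
-- ===== Notes on version B (the rewrite author's own statement) =====
-- stated objective: alternative
-- what changed: Replaced the while/firstDone state machine by a data-driven pipeline: the pending operations (mask chosen from a dispatch table, shift) are collected as closures in a list, the list is reversed when maskFirst is false, and the result is a fold of that list over the value, with the optional NOT at the end.
import Mathlib
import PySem

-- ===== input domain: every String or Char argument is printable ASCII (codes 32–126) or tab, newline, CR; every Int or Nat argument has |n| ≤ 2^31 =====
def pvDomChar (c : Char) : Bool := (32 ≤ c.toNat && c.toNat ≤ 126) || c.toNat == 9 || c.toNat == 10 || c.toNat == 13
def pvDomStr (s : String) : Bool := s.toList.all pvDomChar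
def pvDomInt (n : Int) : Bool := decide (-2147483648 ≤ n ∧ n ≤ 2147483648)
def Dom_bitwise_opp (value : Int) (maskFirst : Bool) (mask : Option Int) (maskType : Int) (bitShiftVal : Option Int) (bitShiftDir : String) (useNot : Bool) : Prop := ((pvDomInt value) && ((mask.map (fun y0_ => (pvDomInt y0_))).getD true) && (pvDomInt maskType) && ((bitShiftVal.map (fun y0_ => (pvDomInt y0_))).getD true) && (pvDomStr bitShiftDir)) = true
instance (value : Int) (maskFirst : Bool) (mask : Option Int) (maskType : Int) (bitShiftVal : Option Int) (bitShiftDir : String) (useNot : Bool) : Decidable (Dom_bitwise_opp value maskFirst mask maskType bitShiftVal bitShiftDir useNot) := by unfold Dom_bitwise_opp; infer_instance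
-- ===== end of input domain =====

-- B replaces A's while/firstDone state machine by a data-driven pipeline: the pending
-- operations are collected as closures in a list, reversed when not maskFirst, and folded
-- over the value; objective: alternative decomposition (same O(1) cost).

-- ===== PORT A =====
-- One iteration of A's while-loop body: either the loop returns (Sum.inl result)
-- or continues with the new (value, firstDone) state (Sum.inr).
def bitwise_opp_body (value : Int) (firstDone : Bool) (maskFirst : Bool) (mask : Option Int)
    (maskType : Int) (bitShiftVal : Option Int) (bitShiftDir : String) (useNot : Bool) :
    Sum Int (Int × Bool) :=
  let step1 : Sum Int (Int × Bool) :=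
    if maskFirst || firstDone then
      let v :=
        match mask with
        | none => value
        | some m =>
          if maskType = 3 then PySem.Int.bxor value m
          else if maskType = 2 then PySem.Int.bor value m
          else if maskType = 1 then PySem.Int.band value m
          else value  -- Python raises Exception here; excluded by Pre_bitwise_opp
      if firstDone = false then Sum.inr (v, true)
      else Sum.inl (if useNot then Int.not v else v)
    else Sum.inr (value, firstDone)
  match step1 with
  | Sum.inl r => Sum.inl r
  | Sum.inr (v, fd) =>
    if !maskFirst || fd then
      let v2 :=
        match bitShiftVal with
        | none => v
        | some k =>
          -- Pre_bitwise_opp guarantees 0 ≤ k, so k.toNat is exact (Python raises on k < 0)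
          if bitShiftDir = "r" then v >>> k.toNat else v <<< k.toNat
      if !fd then Sum.inr (v2, true)
      else Sum.inl (if useNot then Int.not v2 else v2)
    else Sum.inr (v, fd)

-- A's 'while working' loop, with fuel; the body returns within two iterations on every
-- input (firstDone becomes true in iteration 1), so the fuel-0 default 0 is unreachable.
def bitwise_opp_loop (fuel : Nat) (value : Int) (firstDone : Bool) (maskFirst : Bool)
    (mask : Option Int) (maskType : Int) (bitShiftVal : Option Int) (bitShiftDir : String)
    (useNot : Bool) : Int :=
  match fuel with
  | 0 => 0
  | fuel + 1 =>
    match bitwise_opp_body value firstDone maskFirst mask maskType bitShiftVal bitShiftDir useNot with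
    | Sum.inl r => r
    | Sum.inr (v, fd) => bitwise_opp_loop fuel v fd maskFirst mask maskType bitShiftVal bitShiftDir useNot

def bitwise_opp (value : Int) (maskFirst : Bool) (mask : Option Int) (maskType : Int) (bitShiftVal : Option Int) (bitShiftDir : String) (useNot : Bool) : Int :=
  bitwise_opp_loop 2 value false maskFirst mask maskType bitShiftVal bitShiftDir useNot

-- ===== PORT B =====
-- Source B's pipeline of pending operations, as a list of closures (Int → Int).
def bitwise_opp_pipeline (mask : Option Int) (maskType : Int) (bitShiftVal : Option Int)
    (bitShiftDir : String) : List (Int → Int) :=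
  (match mask with
   | none => []
   | some m =>
     -- Source B raises Exception when maskType ∉ {1,2,3}; excluded by Pre_bitwise_opp
     [fun v => if maskType = 3 then PySem.Int.bxor v m
               else if maskType = 2 then PySem.Int.bor v m
               else PySem.Int.band v m])
  ++
  (match bitShiftVal with
   | none => []
   | some k =>
     -- Pre_bitwise_opp guarantees 0 ≤ k, so k.toNat is exact (Python raises on k < 0)
     [fun v => if bitShiftDir = "r" then v >>> k.toNat else v <<< k.toNat])

def bitwise_opp_alt (value : Int) (maskFirst : Bool) (mask : Option Int) (maskType : Int) (bitShiftVal : Option Int) (bitShiftDir : String) (useNot : Bool) : Int :=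
  let pipeline := bitwise_opp_pipeline mask maskType bitShiftVal bitShiftDir
  let pipeline := if maskFirst then pipeline else pipeline.reverse
  let v := pipeline.foldl (fun acc op => op acc) value
  if useNot then Int.not v else v

-- ===== PRECONDITION & SPEC =====
-- Pre_ excludes exactly the inputs where Python A raises: a present mask with a maskType
-- outside {1,2,3} (explicit raise) and a present negative shift count (ValueError).
def Pre_bitwise_opp (value : Int) (maskFirst : Bool) (mask : Option Int) (maskType : Int) (bitShiftVal : Option Int) (bitShiftDir : String) (useNot : Bool) : Prop :=
  (∀ m, mask = some m → maskType = 1 ∨ maskType = 2 ∨ maskType = 3) ∧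
  (∀ k, bitShiftVal = some k → 0 ≤ k)
instance (value : Int) (maskFirst : Bool) (mask : Option Int) (maskType : Int) (bitShiftVal : Option Int) (bitShiftDir : String) (useNot : Bool) : Decidable (Pre_bitwise_opp value maskFirst mask maskType bitShiftVal bitShiftDir useNot) := by unfold Pre_bitwise_opp; infer_instance

def pvWitness_bitwise_opp : Int × Bool × Option Int × Int × Option Int × String × Bool :=
  (170, true, some 15, 1, some 2, "r", false)

def Spec_bitwise_opp (value : Int) (maskFirst : Bool) (mask : Option Int) (maskType : Int) (bitShiftVal : Option Int) (bitShiftDir : String) (useNot : Bool) (out : Int) : Prop := out = bitwise_opp_alt value maskFirst mask maskType bitShiftVal bitShiftDir useNot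
instance (value : Int) (maskFirst : Bool) (mask : Option Int) (maskType : Int) (bitShiftVal : Option Int) (bitShiftDir : String) (useNot : Bool) (out : Int) : Decidable (Spec_bitwise_opp value maskFirst mask maskType bitShiftVal bitShiftDir useNot out) := by unfold Spec_bitwise_opp; infer_instance

-- ===== CLAIM (what is proved, stated in full; the proofs are below) =====
def Claim_equal_bitwise_opp : Prop := ∀ (value : Int) (maskFirst : Bool) (mask : Option Int) (maskType : Int) (bitShiftVal : Option Int) (bitShiftDir : String) (useNot : Bool), Dom_bitwise_opp value maskFirst mask maskType bitShiftVal bitShiftDir useNot → Pre_bitwise_opp value maskFirst mask maskType bitShiftVal bitShiftDir useNot → Spec_bitwise_opp value maskFirst mask maskType bitShiftVal bitShiftDir useNot (bitwise_opp value maskFirst mask maskType bitShiftVal bitShiftDir useNot)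

-- ===== LEMMAS AND PROOFS =====
-- A's two-iteration loop applies exactly the operations of B's pipeline in pipeline order
-- (mask-then-shift when maskFirst, shift-then-mask otherwise); the Pre_ hypothesis makes
-- the maskType dispatch in both ports land in the same branch.

-- ===== VERDICT (by name: the statement is the Claim_ definition above) =====
theorem bitwise_opp_spec : Claim_equal_bitwise_opp := by
  intro value maskFirst mask maskType bitShiftVal bitShiftDir useNot _ hpre
  obtain ⟨hmask, -⟩ := hpre
  unfold Spec_bitwise_opp bitwise_opp bitwise_opp_alt bitwise_opp_pipeline
  cases maskFirst <;> cases mask with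
  | none =>
      cases bitShiftVal <;> simp [bitwise_opp_loop, bitwise_opp_body]
  | some m =>
      rcases hmask m rfl with h | h | h <;> cases bitShiftVal <;>
        simp [bitwise_opp_loop, bitwise_opp_body, h]
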